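-- pv_equiv track=rewrite | github.com/wikiPika/extension-take-home | replay.py | summarize_trace
-- ===== SOURCE A (Python) =====
-- from typing import Any, Dict, List, Tuple
--
-- def summarize_trace(trace: Dict[str, Any]) -> str:
--     steps = trace.get("steps", [])
--     counts: Dict[str, int] = {}
--     for s in steps:
--         t = s.get("type", "unknown")
--         counts[t] = counts.get(t, 0) + 1
--     parts = [f"Total steps: {len(steps)}"]
--     for t in sorted(counts):
--         parts.append(f"  - {t}: {counts[t]}")
--     return "\n".join(parts)
-- ===== SOURCE B (Python) =====
-- def summarize_trace(trace):
--     # Sort-then-scan: no counting dict; sort the flat list of types and emit runs.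
--     steps = trace.get("steps", [])
--     ts = sorted(s.get("type", "unknown") for s in steps)
--     parts = [f"Total steps: {len(steps)}"]
--     while ts:
--         t = ts[0]
--         n = 1
--         while n < len(ts) and ts[n] == t:
--             n += 1
--         parts.append(f"  - {t}: {n}")
--         ts = ts[n:]
--     return "\n".join(parts)
-- ===== Notes on version B (the rewrite author's own statement) =====
-- stated objective: alternative
-- what changed: B never builds a counting dict: it sorts the flat list of type strings and emits one line per run in a single scan, instead of A's hash-count pass followed by sorting the dict keys.
import Mathlib
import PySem

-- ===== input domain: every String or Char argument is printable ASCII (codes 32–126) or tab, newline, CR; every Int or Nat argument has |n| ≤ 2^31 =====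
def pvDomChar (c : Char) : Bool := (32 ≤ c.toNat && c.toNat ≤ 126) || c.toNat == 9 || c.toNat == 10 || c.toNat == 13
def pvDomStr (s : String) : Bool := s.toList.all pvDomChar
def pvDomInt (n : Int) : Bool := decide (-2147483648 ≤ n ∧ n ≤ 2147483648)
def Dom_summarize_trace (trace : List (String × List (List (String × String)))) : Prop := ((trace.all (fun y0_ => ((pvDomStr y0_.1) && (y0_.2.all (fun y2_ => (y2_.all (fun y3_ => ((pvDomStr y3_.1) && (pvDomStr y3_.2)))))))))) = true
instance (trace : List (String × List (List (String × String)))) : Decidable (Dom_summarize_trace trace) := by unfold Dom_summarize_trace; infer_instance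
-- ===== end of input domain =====

-- B replaces A's dict-counting pass with sort-then-scan over the flat type list (alternative decomposition, same results).


-- ===== PORT A =====
-- counts[t] in the loop over sorted(counts) is ported as getD _ 0: t is always a key of counts there, so this is exact.
def summarize_trace (trace : List (String × List (List (String × String)))) : String :=
  let steps := PySem.Dict.getD (PySem.Dict.mk trace) "steps" []
  let counts := steps.foldl
    (fun (d : PySem.Dict String Int) s =>
      let t := PySem.Dict.getD (PySem.Dict.mk s) "type" "unknown"
      d.insert t (d.getD t 0 + 1)) PySem.Dict.empty
  let parts := ["Total steps: " ++ PySem.Int.toStr (steps.length : Int)]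
  let parts := (PySem.List.sorted counts.keys (fun t => t) false).foldl
    (fun ps t => ps ++ ["  - " ++ t ++ ": " ++ PySem.Int.toStr (counts.getD t 0)]) parts
  PySem.Str.join "\n" parts

-- ===== PORT B =====
-- the outer while loop of Source B: emit one line per run of equal strings, then continue past the run
def altRuns : List String → List String
  | [] => []
  | t :: rest =>
    ("  - " ++ t ++ ": " ++ PySem.Int.toStr ((1 + (rest.takeWhile (fun x => x == t)).length : Nat) : Int))
      :: altRuns (rest.dropWhile (fun x => x == t))
termination_by l => l.length
decreasing_by simpa using Nat.lt_succ_of_le (List.length_dropWhile_le _ _)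

def summarize_trace_alt (trace : List (String × List (List (String × String)))) : String :=
  let steps := PySem.Dict.getD (PySem.Dict.mk trace) "steps" []
  let ts := PySem.List.sorted
    (steps.map (fun s => PySem.Dict.getD (PySem.Dict.mk s) "type" "unknown")) (fun t => t) false
  PySem.Str.join "\n" (("Total steps: " ++ PySem.Int.toStr (steps.length : Int)) :: altRuns ts)

-- ===== PRECONDITION & SPEC =====
def Spec_summarize_trace (trace : List (String × List (List (String × String)))) (out : String) : Prop := out = summarize_trace_alt trace
instance (trace : List (String × List (List (String × String)))) (out : String) : Decidable (Spec_summarize_trace trace out) := by unfold Spec_summarize_trace; infer_instance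

-- ===== CLAIM (what is proved, stated in full; the proofs are below) =====
def Claim_equal_summarize_trace : Prop := ∀ (trace : List (String × List (List (String × String)))), Dom_summarize_trace trace → Spec_summarize_trace trace (summarize_trace trace)

-- ===== LEMMAS AND PROOFS =====

-- the distinct heads of the runs of a list (proof-only helper)
def uniqRuns : List String → List String
  | [] => []
  | t :: rest => t :: uniqRuns (rest.dropWhile (fun x => x == t))
termination_by l => l.length
decreasing_by simpa using Nat.lt_succ_of_le (List.length_dropWhile_le _ _)

theorem mem_uniqRuns_iff (zs : List String) (x : String) : x ∈ uniqRuns zs ↔ x ∈ zs := by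
  induction zs using uniqRuns.induct with
  | case1 => simp [uniqRuns]
  | case2 t rest ih =>
    rw [uniqRuns]
    constructor
    · intro h
      rcases List.mem_cons.mp h with h | h
      · simp [h]
      · exact List.mem_cons_of_mem _ ((List.dropWhile_sublist _).mem (ih.mp h))
    · intro h
      rcases List.mem_cons.mp h with h | h
      · simp [h]
      · rcases (List.mem_append.mp (by rw [List.takeWhile_append_dropWhile]; exact h :
            x ∈ rest.takeWhile (fun y => y == t) ++ rest.dropWhile (fun y => y == t))) with h | h
        · have := List.mem_takeWhile_imp h
          simp_all
        · simp [ih.mpr h]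

theorem lt_of_mem_dropWhile (t : String) (r : List String)
    (hp : List.Pairwise (fun a b => a ≤ b) (t :: r)) :
    ∀ y ∈ r.dropWhile (fun x => x == t), t < y := by
  induction r with
  | nil => simp
  | cons x r' ih =>
    intro y hy
    have hpx : List.Pairwise (fun a b => a ≤ b) (t :: r') := by
      rcases List.pairwise_cons.mp hp with ⟨h1, h2⟩
      exact List.pairwise_cons.mpr ⟨fun z hz => h1 z (List.mem_cons_of_mem _ hz),
        (List.pairwise_cons.mp h2).2⟩
    by_cases hx : (x == t) = true
    · simp only [List.dropWhile_cons, hx, if_true] at hy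
      exact ih hpx y hy
    · simp only [List.dropWhile_cons, hx] at hy
      have htx : t < x := lt_of_le_of_ne ((List.pairwise_cons.mp hp).1 x (by simp))
        (fun h => hx (by simp [h.symm]))
      rcases List.mem_cons.mp hy with rfl | hy
      · exact htx
      · exact lt_of_lt_of_le htx ((List.pairwise_cons.mp (List.pairwise_cons.mp hp).2).1 y hy)

theorem pairwise_dropWhile (t : String) (r : List String)
    (hp : List.Pairwise (fun a b => a ≤ b) r) :
    List.Pairwise (fun a b => a ≤ b) (r.dropWhile (fun x => x == t)) :=
  hp.sublist (List.dropWhile_sublist _)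

theorem pairwise_lt_uniqRuns (zs : List String)
    (hp : List.Pairwise (fun a b => a ≤ b) zs) :
    List.Pairwise (fun a b => a < b) (uniqRuns zs) := by
  induction zs using uniqRuns.induct with
  | case1 => simp [uniqRuns]
  | case2 t rest ih =>
    rw [uniqRuns]
    refine List.pairwise_cons.mpr ⟨?_, ih (pairwise_dropWhile t rest (List.pairwise_cons.mp hp).2)⟩
    intro y hy
    exact lt_of_mem_dropWhile t rest hp y ((mem_uniqRuns_iff _ y).mp hy)

theorem count_head_run (t : String) (r : List String)
    (hp : List.Pairwise (fun a b => a ≤ b) (t :: r)) :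
    (t :: r).count t = 1 + (r.takeWhile (fun x => x == t)).length := by
  have hsplit : r.count t = (r.takeWhile (fun x => x == t)).count t
      + (r.dropWhile (fun x => x == t)).count t := by
    conv_lhs => rw [← List.takeWhile_append_dropWhile (p := fun x => x == t) (l := r)]
    exact List.count_append ..
  have htake : (r.takeWhile (fun x => x == t)).count t = (r.takeWhile (fun x => x == t)).length := by
    apply List.count_eq_length.mpr
    intro y hy
    have := List.mem_takeWhile_imp hy
    simp_all
  have hdrop : (r.dropWhile (fun x => x == t)).count t = 0 := by
    apply List.count_eq_zero.mpr
    intro hmem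
    exact absurd rfl (ne_of_gt (lt_of_mem_dropWhile t r hp t hmem))
  simp [hsplit, htake, hdrop, Nat.add_comm]

theorem count_tail_of_gt (t : String) (r : List String) (y : String)
    (hy : t < y) :
    (t :: r).count y = (r.dropWhile (fun x => x == t)).count y := by
  have hsplit : r.count y = (r.takeWhile (fun x => x == t)).count y
      + (r.dropWhile (fun x => x == t)).count y := by
    conv_lhs => rw [← List.takeWhile_append_dropWhile (p := fun x => x == t) (l := r)]
    exact List.count_append ..
  have htake : (r.takeWhile (fun x => x == t)).count y = 0 := by
    apply List.count_eq_zero.mpr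
    intro hmem
    have := List.mem_takeWhile_imp hmem
    have : y = t := by simp_all
    exact absurd this (ne_of_gt hy)
  have hne : ¬ (t == y) := by simp [ne_of_lt hy]
  simp [List.count_cons, hsplit, htake, hne]

theorem altRuns_eq_map (zs : List String)
    (hp : List.Pairwise (fun a b => a ≤ b) zs) :
    altRuns zs = (uniqRuns zs).map
      (fun t => "  - " ++ t ++ ": " ++ PySem.Int.toStr ((zs.count t : Nat) : Int)) := by
  induction zs using altRuns.induct with
  | case1 => simp [altRuns, uniqRuns]
  | case2 t rest ih =>
    rw [altRuns, uniqRuns, List.map_cons]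
    have hdrop := pairwise_dropWhile t rest (List.pairwise_cons.mp hp).2
    congr 1
    · rw [count_head_run t rest hp]
    · rw [ih hdrop]
      apply List.map_congr_left
      intro y hy
      have hty : t < y := lt_of_mem_dropWhile t rest hp y ((mem_uniqRuns_iff _ y).mp hy)
      rw [count_tail_of_gt t rest y hty]

theorem uniqRuns_sorted_eq (ts : List String) :
    PySem.List.sorted (PySem.Set.ofList ts) (fun t => t) false
      = uniqRuns (PySem.List.sorted ts (fun t => t) false) := by
  set zs := PySem.List.sorted ts (fun t => t) false with hzs
  have hp : List.Pairwise (fun a b => a ≤ b) zs := PySem.List.sorted_pairwise ts (fun t => t)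
  apply PySem.List.sorted_eq_of_perm_of_pairwise_lt
  · refine (List.perm_ext_iff_of_nodup ?_ (PySem.Set.nodup_ofList ts)).mpr ?_
    · exact (pairwise_lt_uniqRuns zs hp).imp ne_of_lt
    · intro a
      rw [mem_uniqRuns_iff, PySem.Set.mem_ofList]
      exact ⟨fun h => (PySem.List.sorted_perm ts (fun t => t) false).mem_iff.mp h,
        fun h => (PySem.List.sorted_perm ts (fun t => t) false).mem_iff.mpr h⟩
  · exact pairwise_lt_uniqRuns zs hp

-- ===== VERDICT (by name: the statement is the Claim_ definition above) =====
theorem summarize_trace_spec : Claim_equal_summarize_trace := by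
  intro trace _
  show summarize_trace trace = summarize_trace_alt trace
  unfold summarize_trace summarize_trace_alt
  simp only []
  set steps := PySem.Dict.getD (PySem.Dict.mk trace) "steps" [] with hsteps
  have hcounts : steps.foldl
      (fun (d : PySem.Dict String Int) s =>
        let t := PySem.Dict.getD (PySem.Dict.mk s) "type" "unknown"
        d.insert t (d.getD t 0 + 1)) PySem.Dict.empty
      = PySem.Dict.counter (steps.map (fun s => PySem.Dict.getD (PySem.Dict.mk s) "type" "unknown")) := by
    rw [PySem.Dict.counter, List.foldl_map]
    rfl
  rw [hcounts, PySem.Dict.keys_counter,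
    PySem.List.foldl_append_singleton_eq_map, uniqRuns_sorted_eq,
    altRuns_eq_map _ (PySem.List.sorted_pairwise _ _), List.singleton_append]
  congr 2
  apply List.map_congr_left
  intro y _
  rw [PySem.Dict.getD_counter,
    (PySem.List.sorted_perm (steps.map (fun s => PySem.Dict.getD (PySem.Dict.mk s) "type" "unknown")) (fun t => t) false).count_eq y]
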